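-- pv_equiv track=rewrite | github.com/Vergil0327/leetcode-history | Stack/1096. Brace Expansion II/solution.py | braceExpansionII
-- ===== SOURCE A (Python) =====
-- from typing import List
--
-- def braceExpansionII(expr: str) -> List[str]:
--     n = len(expr)
--
--     def product(arr1, arr2):
--         if not arr1: return arr2
--         return [s1+s2 for s1 in arr1 for s2 in arr2]
--
--     stack = []
--     arr, cur = [], []
--     for i in range(n):
--         if expr[i] == "{":
--             stack.append(arr)
--             stack.append(cur)
--             arr, cur = [], []
--         elif expr[i] == "}":
--             pre = stack.pop()
--             preArr = stack.pop()
--             cur = product(pre, arr+cur)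
--             arr = preArr
--         elif expr[i] == ",":
--             arr += cur
--             cur = []
--         else: # elif expr[i].isalpha():
--             cur = product(cur, [expr[i]])
--
--     return sorted(set(arr+cur))
-- ===== SOURCE B (Python) =====
-- from typing import List
--
-- def braceExpansionII(expr: str) -> List[str]:
--     # Recursive-descent parser over the grammar
--     #   expr := term (',' term)* ; term := factor* ; factor := '{' expr '}' | literal run
--     # returning a deduplicated set at every node, instead of A's iterative stack
--     # machine over raw lists deduplicated once at the end.  Recursion follows
--     # the nesting structure only; factors and comma-alternatives are loops.
--     n = len(expr)
--
--     def parse_term(i):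
--         acc = set()  # set of the strings of the factors read so far (empty = none yet)
--         while i < n and expr[i] not in ',}':
--             if expr[i] == '{':
--                 f, i = parse_expr(i + 1)
--                 if i == n or expr[i] != '}':
--                     raise ValueError("expected '}'")
--                 i += 1
--             else:
--                 j = i
--                 while j < n and expr[j] not in ',{}':
--                     j += 1
--                 f, i = {expr[i:j]}, j
--             acc = f if not acc else {a + b for a in acc for b in f}
--         return acc, i
--
--     def parse_expr(i):
--         s, i = parse_term(i)
--         while i < n and expr[i] == ',':
--             s2, i = parse_term(i + 1)
--             s |= s2
--         return s, i
--
--     res, i = parse_expr(0)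
--     if i != n:
--         raise ValueError("unmatched '}'")
--     return sorted(res)
-- ===== Notes on version B (the rewrite author's own statement) =====
-- stated objective: faster
-- what changed: B replaces A's iterative stack machine over raw duplicate-carrying lists (deduplicated only at the very end) by a recursive-descent parser on the grammar expr := term (',' term)*, term := factor*, factor := '{' expr '}' | literal run, keeping a deduplicated set at every union/concatenation node and consuming each maximal literal run as one factor instead of one string-rebuilding product per character.
-- outside the precondition, e.g. on braceExpansionII('{a'): A returns ['a'], B raises ValueError; on braceExpansionII('{'): A returns [], B raises ValueError; on braceExpansionII('}'): A raises IndexError, B raises ValueError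
import Mathlib
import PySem

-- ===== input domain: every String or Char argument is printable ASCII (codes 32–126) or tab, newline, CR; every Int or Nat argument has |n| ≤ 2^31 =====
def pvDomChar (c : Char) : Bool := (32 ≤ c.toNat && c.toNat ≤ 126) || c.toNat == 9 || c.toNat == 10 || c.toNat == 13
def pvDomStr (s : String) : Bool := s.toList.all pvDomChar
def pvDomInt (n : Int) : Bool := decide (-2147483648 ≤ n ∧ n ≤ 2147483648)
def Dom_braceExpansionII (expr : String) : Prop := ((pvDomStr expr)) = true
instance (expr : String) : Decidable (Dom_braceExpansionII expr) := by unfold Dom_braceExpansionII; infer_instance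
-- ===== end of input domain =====

-- B replaces A's iterative stack machine over duplicate-carrying lists by a
-- recursive-descent parser on the brace grammar that keeps a deduplicated set at
-- every node and consumes literal runs in one step (measured faster by the check).

-- ===== PORT A =====
-- helper 'product' of A, literally: 'if not arr1: return arr2; return [s1+s2 ...]'
def productA (arr1 arr2 : List String) : List String :=
  if arr1 = [] then arr2
  else arr1.flatMap (fun s1 => arr2.map (fun s2 => s1 ++ s2))

-- one loop iteration of A; Python's list-used-as-stack is transliterated with the
-- list head as the stack top (append arr then cur = push so cur is on top).
-- On '}' with an empty/short stack Python raises IndexError (excluded by Pre_);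
-- the catch-all branch is unreachable under Pre_.
def stepA (st : List (List String) × List String × List String) (c : Char) :
    List (List String) × List String × List String :=
  let (stack, arr, cur) := st
  if c = '{' then (cur :: arr :: stack, [], [])
  else if c = '}' then
    match stack with
    | pre :: preArr :: rest => (rest, preArr, productA pre (arr ++ cur))
    | _ => (stack, arr, cur)
  else if c = ',' then (stack, arr ++ cur, [])
  else (stack, arr, productA cur [String.ofList [c]])

def braceExpansionII (expr : String) : List String :=
  let st := expr.toList.foldl stepA ([], [], [])
  PySem.List.sorted (PySem.Set.ofList (st.2.1 ++ st.2.2)) (fun s => s)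

-- ===== PORT B =====
-- B's factor-accumulator update: 'f if not acc else {a + b for a in acc for b in f}'
def combineB (acc f : PySem.Set String) : PySem.Set String :=
  if acc = [] then f
  else PySem.Set.ofList (acc.flatMap (fun a => f.map (fun b => a ++ b)))

-- a plain literal character: anything but ',' '{' '}'
def plainB (c : Char) : Bool := !(c = ',' || c = '}' || c = '{')

-- the recursive-descent parser; the remaining input plays Python's index i, the
-- two while loops are the tail-recursive termLoopB / exprAuxB, and Python's
-- recursion into '{...}' is ported with a fuel counter (2*length+2 provably
-- suffices, see termLoop_exprLoop_success); 'none' is exactly where the Python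
-- parser raises ValueError.
mutual
def termLoopB : Nat → PySem.Set String → List Char → Option (PySem.Set String × List Char)
  | 0, _, _ => none
  | Nat.succ n, acc, cs =>
    match cs with
    | [] => some (acc, [])
    | c :: rest =>
      if c = ',' ∨ c = '}' then some (acc, c :: rest)
      else if c = '{' then
        match exprLoopB n rest with
        | some (f, '}' :: r1) => termLoopB n (combineB acc f) r1
        | _ => none
      else -- a maximal run of literal characters is one factor (expr[i:j])
        termLoopB n
          (combineB acc (PySem.Set.ofList [String.ofList (c :: rest.takeWhile plainB)]))
          (rest.dropWhile plainB)

def exprLoopB : Nat → List Char → Option (PySem.Set String × List Char)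
  | 0, _ => none
  | Nat.succ n, cs =>
    match termLoopB n PySem.Set.empty cs with
    | none => none
    | some (s1, r1) => exprAuxB n s1 r1

-- the 'while i < n and expr[i] == ","' loop of parse_expr: s |= parse_term(i+1)
def exprAuxB : Nat → PySem.Set String → List Char → Option (PySem.Set String × List Char)
  | 0, _, _ => none
  | Nat.succ n, s, cs =>
    match cs with
    | c :: r2 =>
      if c = ',' then
        match termLoopB n PySem.Set.empty r2 with
        | none => none
        | some (s2, r3) => exprAuxB n (PySem.Set.union s s2) r3
      else some (s, c :: r2)
    | [] => some (s, [])
end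

def braceExpansionII_alt (expr : String) : List String :=
  let cs := expr.toList
  match exprLoopB (2 * cs.length + 2) cs with
  | some (s, []) => PySem.List.sorted s (fun s => s)
  | _ => []   -- Python raises ValueError here (unmatched brace); outside Pre_

-- ===== PRECONDITION & SPEC =====
-- every '}' is matched: scanning with a depth counter d, a '}' never meets d = 0
def balOK : List Char → Nat → Bool
  | [], _ => true
  | c :: cs, d =>
    if c = '{' then balOK cs (d + 1)
    else if c = '}' then decide (d ≠ 0) && balOK cs (d - 1)
    else balOK cs d

-- Pre_ excludes exactly the unbalanced inputs: on a '}' with no open '{' A raises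
-- IndexError (B raises ValueError too), and on a leftover unmatched '{' A returns
-- a value from the dangling state, silently discarding the pushed stack frames —
-- an artefact of its stack loop — while the natural B parser raises ValueError.
def Pre_braceExpansionII (expr : String) : Prop :=
  balOK expr.toList 0 = true ∧ expr.toList.count '}' = expr.toList.count '{'
instance (expr : String) : Decidable (Pre_braceExpansionII expr) := by
  unfold Pre_braceExpansionII; infer_instance

def pvWitness_braceExpansionII : String := "{a,b}c"

def Spec_braceExpansionII (expr : String) (out : List String) : Prop := out = braceExpansionII_alt expr
instance (expr : String) (out : List String) : Decidable (Spec_braceExpansionII expr out) := by unfold Spec_braceExpansionII; infer_instance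

-- ===== CLAIM (what is proved, stated in full; the proofs are below) =====
def Claim_equal_braceExpansionII : Prop := ∀ (expr : String), Dom_braceExpansionII expr → Pre_braceExpansionII expr → Spec_braceExpansionII expr (braceExpansionII expr)

-- ===== LEMMAS AND PROOFS =====

-- a raw list of A corresponds to a set of B holding the same strings, no duplicates
def Rset (l : List String) (s : PySem.Set String) : Prop :=
  s.Nodup ∧ ∀ x, x ∈ s ↔ x ∈ l

lemma Rset_empty : Rset [] PySem.Set.empty := by
  constructor
  · exact List.nodup_nil
  · intro x; simp [PySem.Set.empty]

lemma Rset_nil_iff {l : List String} {s : PySem.Set String} (h : Rset l s) :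
    l = [] ↔ s = [] := by
  rw [List.eq_nil_iff_forall_not_mem, List.eq_nil_iff_forall_not_mem]
  constructor
  · intro hl x hx; exact hl x ((h.2 x).mp hx)
  · intro hs x hx; exact hs x ((h.2 x).mpr hx)

lemma Rset_ofList {l : List String} {xs : List String}
    (h : ∀ x, x ∈ xs ↔ x ∈ l) : Rset l (PySem.Set.ofList xs) := by
  constructor
  · exact PySem.Set.nodup_ofList xs
  · intro x; rw [PySem.Set.mem_ofList, h x]

lemma Rset_prod {pl gl : List String} {ps gs : PySem.Set String}
    (hp : Rset pl ps) (hg : Rset gl gs) :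
    Rset (pl.flatMap (fun a => gl.map (fun b => a ++ b)))
      (PySem.Set.ofList (ps.flatMap (fun a => gs.map (fun b => a ++ b)))) := by
  apply Rset_ofList
  intro x
  simp only [List.mem_flatMap, List.mem_map]
  constructor
  · rintro ⟨a, ha, b, hb, rfl⟩
    exact ⟨a, (hp.2 a).mp ha, b, (hg.2 b).mp hb, rfl⟩
  · rintro ⟨a, ha, b, hb, rfl⟩
    exact ⟨a, (hp.2 a).mpr ha, b, (hg.2 b).mpr hb, rfl⟩

-- A's per-factor product matches B's per-factor combine
lemma Rset_combine {l f : List String} {s fs : PySem.Set String}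
    (h : Rset l s) (hf : Rset f fs) : Rset (productA l f) (combineB s fs) := by
  by_cases hs : s = []
  · have hl : l = [] := (Rset_nil_iff h).mpr hs
    simp only [productA, combineB, hl, hs]
    exact hf
  · have hl : l ≠ [] := fun h' => hs ((Rset_nil_iff h).mp h')
    simp only [productA, combineB, if_neg hl, if_neg hs]
    exact Rset_prod h hf

-- A's single-character product, in closed form
lemma productA_single (cur : List String) (s : String) :
    productA cur [s] = if cur = [] then [s] else cur.map (fun a => a ++ s) := by
  by_cases h : cur = [] <;>
    simp [productA, h, Eq.symm List.map_eq_flatMap]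

-- two successive single-string products of A fuse (also through the
-- empty-list-is-identity branch)
lemma productA_merge (cur : List String) (s1 s2 : String) :
    productA (productA cur [s1]) [s2] = productA cur [s1 ++ s2] := by
  by_cases h : cur = []
  · simp [productA_single, h]
  · have h2 : cur.map (fun a => a ++ s1) ≠ [] := by simpa using h
    simp [productA_single, h, h2, List.map_map, Function.comp_def, String.append_assoc]

lemma plainB_spec {c : Char} (h : plainB c = true) : c ≠ ',' ∧ c ≠ '}' ∧ c ≠ '{' := by
  simp [plainB] at h; exact ⟨h.1.1, h.1.2, h.2⟩

-- A's machine crosses a run of literal characters as one fused product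
lemma foldl_plain_run : ∀ (ts rest' : List Char) (stack : List (List String))
    (arr cur : List String), (∀ c ∈ ts, plainB c = true) → ts ≠ [] →
    List.foldl stepA (stack, arr, cur) (ts ++ rest') =
    List.foldl stepA (stack, arr, productA cur [String.ofList ts]) rest' := by
  intro ts
  induction ts with
  | nil => intro _ _ _ _ _ hne; exact absurd rfl hne
  | cons t ts ih =>
    intro rest' stack arr cur hp _
    obtain ⟨ht1, ht2, ht3⟩ := plainB_spec (hp t List.mem_cons_self)
    have hstep : List.foldl stepA (stack, arr, cur) ((t :: ts) ++ rest') =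
        List.foldl stepA (stack, arr, productA cur [String.ofList [t]]) (ts ++ rest') := by
      simp [stepA, ht1, ht2, ht3]
    rcases eq_or_ne ts [] with rfl | hts
    · simpa using hstep
    · rw [hstep, ih rest' stack arr _ (fun c hc => hp c (List.mem_cons_of_mem t hc)) hts,
        productA_merge, ← String.ofList_append]
      rfl

-- a literal run changes neither the balance scan nor the brace counts
lemma balOK_plain_prefix : ∀ (ts cs : List Char) (d : Nat),
    (∀ c ∈ ts, plainB c = true) → balOK (ts ++ cs) d = balOK cs d := by
  intro ts
  induction ts with
  | nil => intro cs d _; rfl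
  | cons t ts ih =>
    intro cs d hp
    obtain ⟨ht1, ht2, ht3⟩ := plainB_spec (hp t List.mem_cons_self)
    rw [List.cons_append]
    simp only [balOK, if_neg ht3, if_neg ht2]
    exact ih cs d (fun c hc => hp c (List.mem_cons_of_mem t hc))

lemma count_plain_prefix (ts cs : List Char) (b : Char)
    (hb : b = '{' ∨ b = '}') (hp : ∀ c ∈ ts, plainB c = true) :
    (ts ++ cs).count b = cs.count b := by
  rw [List.count_append, List.count_eq_zero.mpr, Nat.zero_add]
  intro hmem
  obtain ⟨-, hc2, hc3⟩ := plainB_spec (hp b hmem)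
  rcases hb with rfl | rfl
  · exact hc3 rfl
  · exact hc2 rfl

-- the two ports walk the same input in step: a successful parse of a term /
-- expr / comma-chain segment transforms A's machine state exactly as B's sets say
lemma termLoop_exprLoop_sim : ∀ n : Nat,
    (∀ (acc : PySem.Set String) (cs : List Char) (s : PySem.Set String) (r : List Char),
      termLoopB n acc cs = some (s, r) →
      ∀ (stack : List (List String)) (arr cur : List String), Rset cur acc →
      ∃ cur', Rset cur' s ∧
        List.foldl stepA (stack, arr, cur) cs = List.foldl stepA (stack, arr, cur') r)
    ∧
    (∀ (cs : List Char) (s : PySem.Set String) (r : List Char),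
      exprLoopB n cs = some (s, r) →
      ∀ (stack : List (List String)) (arr0 : List String),
      ∃ arr' cur', s.Nodup ∧ (∀ x, x ∈ arr' ++ cur' ↔ x ∈ arr0 ∨ x ∈ s) ∧
        List.foldl stepA (stack, arr0, []) cs = List.foldl stepA (stack, arr', cur') r)
    ∧
    (∀ (acc : PySem.Set String) (cs : List Char) (s : PySem.Set String) (r : List Char),
      exprAuxB n acc cs = some (s, r) →
      ∀ (stack : List (List String)) (ctx arrA curA : List String),
      acc.Nodup → (∀ x, x ∈ arrA ++ curA ↔ x ∈ ctx ∨ x ∈ acc) →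
      ∃ arr' cur', s.Nodup ∧ (∀ x, x ∈ arr' ++ cur' ↔ x ∈ ctx ∨ x ∈ s) ∧
        List.foldl stepA (stack, arrA, curA) cs = List.foldl stepA (stack, arr', cur') r) := by
  intro n
  induction n with
  | zero =>
    refine ⟨?_, ?_, ?_⟩
    · intro acc cs s r h; simp [termLoopB] at h
    · intro cs s r h; simp [exprLoopB] at h
    · intro acc cs s r h; simp [exprAuxB] at h
  | succ n ih =>
    obtain ⟨iht, ihe, iha⟩ := ih
    refine ⟨?_, ?_, ?_⟩
    · -- term part
      intro acc cs s r h stack arr cur hcur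
      match cs with
      | [] =>
        simp only [termLoopB, Option.some.injEq, Prod.mk.injEq] at h
        obtain ⟨rfl, rfl⟩ := h
        exact ⟨cur, hcur, rfl⟩
      | c :: rest =>
        simp only [termLoopB] at h
        by_cases h1 : c = ',' ∨ c = '}'
        · rw [if_pos h1] at h
          simp only [Option.some.injEq, Prod.mk.injEq] at h
          obtain ⟨rfl, rfl⟩ := h
          exact ⟨cur, hcur, rfl⟩
        · rw [if_neg h1] at h
          rw [not_or] at h1
          by_cases h2 : c = '{'
          · rw [if_pos h2] at h
            subst h2
            rcases he : exprLoopB n rest with _ | ⟨f, r0⟩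
            · rw [he] at h; exact absurd h (by simp)
            · rw [he] at h
              rcases r0 with _ | ⟨c0, r1⟩
              · exact absurd h (by simp)
              · by_cases hc0 : c0 = '}'
                · subst hc0
                  simp only at h
                  obtain ⟨arr1, cur1, hnd, hmem, heq⟩ := ihe rest f ('}' :: r1) he (cur :: arr :: stack) []
                  have hgrp : Rset (arr1 ++ cur1) f := ⟨hnd, fun x => by rw [hmem x]; simp⟩
                  obtain ⟨cur', hcur', heq2⟩ :=
                    iht (combineB acc f) r1 s r h stack arr (productA cur (arr1 ++ cur1))
                      (Rset_combine hcur hgrp)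
                  refine ⟨cur', hcur', ?_⟩
                  calc List.foldl stepA (stack, arr, cur) ('{' :: rest)
                      = List.foldl stepA (cur :: arr :: stack, [], []) rest := by
                        simp [stepA]
                    _ = List.foldl stepA (cur :: arr :: stack, arr1, cur1) ('}' :: r1) := heq
                    _ = List.foldl stepA (stack, arr, productA cur (arr1 ++ cur1)) r1 := by
                        simp [stepA]
                    _ = List.foldl stepA (stack, arr, cur') r := heq2
                · exact absurd h (by simp [hc0])
          · rw [if_neg h2] at h
            have hplain : ∀ x ∈ (c :: rest.takeWhile plainB), plainB x = true := by
              intro x hx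
              rcases List.mem_cons.mp hx with rfl | hx
              · simp [plainB, h1.1, h1.2, h2]
              · exact List.mem_takeWhile_imp hx
            obtain ⟨cur', hcur', heq⟩ :=
              iht _ (rest.dropWhile plainB) s r h stack arr
                (productA cur [String.ofList (c :: rest.takeWhile plainB)])
                (Rset_combine hcur (Rset_ofList (fun x => Iff.rfl)))
            refine ⟨cur', hcur', ?_⟩
            calc List.foldl stepA (stack, arr, cur) (c :: rest)
                = List.foldl stepA (stack, arr, cur)
                    ((c :: rest.takeWhile plainB) ++ rest.dropWhile plainB) := by
                  rw [List.cons_append, List.takeWhile_append_dropWhile]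
              _ = List.foldl stepA
                    (stack, arr, productA cur [String.ofList (c :: rest.takeWhile plainB)])
                    (rest.dropWhile plainB) :=
                  foldl_plain_run _ _ _ _ _ hplain (by simp)
              _ = List.foldl stepA (stack, arr, cur') r := heq
    · -- expr part
      intro cs s r h stack arr0
      simp only [exprLoopB] at h
      rcases ht : termLoopB n PySem.Set.empty cs with _ | ⟨s1, r1⟩
      · rw [ht] at h; exact absurd h (by simp)
      · rw [ht] at h
        simp only [] at h
        obtain ⟨cur1, hcur1, heq1⟩ := iht _ cs s1 r1 ht stack arr0 [] Rset_empty
        obtain ⟨arr', cur', hnd, hmem, heq2⟩ :=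
          iha s1 r1 s r h stack arr0 arr0 cur1 hcur1.1
            (fun x => by rw [List.mem_append, hcur1.2 x])
        exact ⟨arr', cur', hnd, hmem, heq1.trans heq2⟩
    · -- comma-chain part
      intro acc cs s r h stack ctx arrA curA hnd hmem
      match cs with
      | [] =>
        simp only [exprAuxB, Option.some.injEq, Prod.mk.injEq] at h
        obtain ⟨rfl, rfl⟩ := h
        exact ⟨arrA, curA, hnd, hmem, rfl⟩
      | c :: r2 =>
        simp only [exprAuxB] at h
        by_cases hc : c = ','
        · subst hc
          rw [if_pos rfl] at h
          rcases ht : termLoopB n PySem.Set.empty r2 with _ | ⟨s2, r3⟩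
          · rw [ht] at h; exact absurd h (by simp)
          · rw [ht] at h
            simp only [] at h
            obtain ⟨cur2, hcur2, heq2⟩ := iht _ r2 s2 r3 ht stack (arrA ++ curA) [] Rset_empty
            obtain ⟨arr', cur', hnd', hmem', heq3⟩ :=
              iha (PySem.Set.union acc s2) r3 s r h stack ctx (arrA ++ curA) cur2
                (PySem.Set.nodup_union acc s2 hnd)
                (fun x => by
                  rw [List.mem_append, List.mem_append, PySem.Set.mem_union,
                    hcur2.2 x]
                  have := hmem x
                  rw [List.mem_append] at this
                  tauto)
            refine ⟨arr', cur', hnd', hmem', ?_⟩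
            calc List.foldl stepA (stack, arrA, curA) (',' :: r2)
                = List.foldl stepA (stack, arrA ++ curA, []) r2 := by simp [stepA]
              _ = List.foldl stepA (stack, arrA ++ curA, cur2) r3 := heq2
              _ = List.foldl stepA (stack, arr', cur') r := heq3
        · rw [if_neg hc] at h
          simp only [Option.some.injEq, Prod.mk.injEq] at h
          obtain ⟨rfl, rfl⟩ := h
          exact ⟨arrA, curA, hnd, hmem, rfl⟩

-- on a balanced input the parser succeeds and consumes everything
lemma termLoop_exprLoop_success : ∀ n : Nat,
    (∀ (acc : PySem.Set String) (cs : List Char) (d : Nat),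
      2 * cs.length < n → balOK cs d = true → cs.count '}' = cs.count '{' + d →
      ∃ s r, termLoopB n acc cs = some (s, r) ∧ r.length ≤ cs.length ∧
        balOK r d = true ∧ r.count '}' = r.count '{' + d ∧
        (r = [] ∨ ∃ c r', r = c :: r' ∧ (c = ',' ∨ c = '}')))
    ∧
    (∀ (cs : List Char) (d : Nat),
      2 * cs.length + 1 < n → balOK cs d = true → cs.count '}' = cs.count '{' + d →
      ∃ s r, exprLoopB n cs = some (s, r) ∧ r.length ≤ cs.length ∧
        balOK r d = true ∧ r.count '}' = r.count '{' + d ∧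
        (r = [] ∨ ∃ r', r = '}' :: r'))
    ∧
    (∀ (acc : PySem.Set String) (cs : List Char) (d : Nat),
      2 * cs.length < n → balOK cs d = true → cs.count '}' = cs.count '{' + d →
      (cs = [] ∨ ∃ c r', cs = c :: r' ∧ (c = ',' ∨ c = '}')) →
      ∃ s r, exprAuxB n acc cs = some (s, r) ∧ r.length ≤ cs.length ∧
        balOK r d = true ∧ r.count '}' = r.count '{' + d ∧
        (r = [] ∨ ∃ r', r = '}' :: r')) := by
  intro n
  induction n with
  | zero =>
    refine ⟨?_, ?_, ?_⟩
    · intro acc cs d hf; omega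
    · intro cs d hf; omega
    · intro acc cs d hf; omega
  | succ n ih =>
    obtain ⟨iht, ihe, iha⟩ := ih
    refine ⟨?_, ?_, ?_⟩
    · -- term part
      intro acc cs d hf hb hc
      match cs with
      | [] => exact ⟨acc, [], rfl, Nat.le_refl 0, hb, hc, Or.inl rfl⟩
      | c :: rest =>
        by_cases h1 : c = ',' ∨ c = '}'
        · refine ⟨acc, c :: rest, ?_, Nat.le_refl _, hb, hc, Or.inr ⟨c, rest, rfl, h1⟩⟩
          simp only [termLoopB, if_pos h1]
        · rw [not_or] at h1
          by_cases h2 : c = '{'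
          · subst h2
            have hb' : balOK rest (d + 1) = true := by simpa [balOK] using hb
            have hc' : rest.count '}' = rest.count '{' + (d + 1) := by
              simp at hc; omega
            obtain ⟨f, r0, he, hlen0, hb0, hc0, hshape⟩ :=
              ihe rest (d + 1) (by simp at hf ⊢; omega) hb' hc'
            rcases hshape with rfl | ⟨r1, rfl⟩
            · simp at hc0
            · have hb1 : balOK r1 d = true := by simpa [balOK] using hb0
              have hc1 : r1.count '}' = r1.count '{' + d := by
                simp at hc0; omega
              have hl1 : r1.length + 1 ≤ rest.length := by
                simpa using hlen0
              obtain ⟨s, r, ht, hlen, hbr, hcr, hsh⟩ :=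
                iht (combineB acc f) r1 d (by simp at hf ⊢; omega) hb1 hc1
              refine ⟨s, r, ?_, by simp; omega, hbr, hcr, hsh⟩
              simp only [termLoopB, if_neg (not_or.mpr h1)]
              rw [he]
              exact ht
          · have hplain : ∀ x ∈ (c :: rest.takeWhile plainB), plainB x = true := by
              intro x hx
              rcases List.mem_cons.mp hx with rfl | hx
              · simp [plainB, h1.1, h1.2, h2]
              · exact List.mem_takeWhile_imp hx
            have hsplit : (c :: rest.takeWhile plainB) ++ rest.dropWhile plainB = c :: rest := by
              rw [List.cons_append, List.takeWhile_append_dropWhile]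
            have hb' : balOK (rest.dropWhile plainB) d = true := by
              rw [← balOK_plain_prefix _ (rest.dropWhile plainB) d hplain, hsplit]
              exact hb
            have hc' : (rest.dropWhile plainB).count '}' = (rest.dropWhile plainB).count '{' + d := by
              rw [← count_plain_prefix _ (rest.dropWhile plainB) '}' (Or.inr rfl) hplain,
                ← count_plain_prefix _ (rest.dropWhile plainB) '{' (Or.inl rfl) hplain, hsplit]
              exact hc
            have hld : (rest.dropWhile plainB).length ≤ rest.length :=
              List.length_dropWhile_le plainB rest
            obtain ⟨s, r, ht, hlen, hbr, hcr, hsh⟩ :=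
              iht (combineB acc (PySem.Set.ofList [String.ofList (c :: rest.takeWhile plainB)]))
                (rest.dropWhile plainB) d (by simp at hf ⊢; omega) hb' hc'
            refine ⟨s, r, ?_, by simp; omega, hbr, hcr, hsh⟩
            simp only [termLoopB, if_neg (not_or.mpr h1), if_neg h2]
            exact ht
    · -- expr part
      intro cs d hf hb hc
      obtain ⟨s1, r1, ht, hlen1, hb1, hc1, hshape⟩ :=
        iht PySem.Set.empty cs d (by omega) hb hc
      obtain ⟨s, r, ha, hlen, hbr, hcr, hsh⟩ :=
        iha s1 r1 d (by omega) hb1 hc1 hshape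
      refine ⟨s, r, ?_, by omega, hbr, hcr, hsh⟩
      simp only [exprLoopB]
      rw [ht]
      exact ha
    · -- comma-chain part
      intro acc cs d hf hb hc hshape
      rcases hshape with rfl | ⟨c, r', rfl, hcor⟩
      · exact ⟨acc, [], rfl, by simp, hb, hc, Or.inl rfl⟩
      · rcases hcor with rfl | rfl
        · have hb' : balOK r' d = true := by simpa [balOK] using hb
          have hc' : r'.count '}' = r'.count '{' + d := by
            simp at hc; omega
          obtain ⟨s2, r3, ht, hlen3, hb3, hc3, hsh3⟩ :=
            iht PySem.Set.empty r' d (by simp at hf ⊢; omega) hb' hc'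
          obtain ⟨s, r, ha, hlen, hbr, hcr, hsh⟩ :=
            iha (PySem.Set.union acc s2) r3 d (by simp at hf ⊢; omega) hb3 hc3 hsh3
          refine ⟨s, r, ?_, by simp at hlen3 ⊢; omega, hbr, hcr, hsh⟩
          simp only [exprAuxB]
          rw [ht]
          exact ha
        · refine ⟨acc, '}' :: r', ?_, Nat.le_refl _, hb, hc, Or.inr ⟨r', rfl⟩⟩
          simp only [exprAuxB]
          rw [if_neg (by decide : ¬('}' : Char) = ',')]

-- ===== VERDICT (by name: the statement is the Claim_ definition above) =====
theorem braceExpansionII_spec : Claim_equal_braceExpansionII := by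
  intro expr _ hpre
  obtain ⟨hb, hc⟩ := hpre
  unfold Spec_braceExpansionII
  obtain ⟨s, r, he, -, hbr, -, hshape⟩ :=
    (termLoop_exprLoop_success (2 * expr.toList.length + 2)).2.1 expr.toList 0
      (by omega) hb (by omega)
  have hr : r = [] := by
    rcases hshape with rfl | ⟨r', rfl⟩
    · rfl
    · simp [balOK] at hbr
  subst hr
  obtain ⟨arr', cur', hnd, hmem, heq⟩ :=
    (termLoop_exprLoop_sim (2 * expr.toList.length + 2)).2.1 expr.toList s [] he [] []
  have hst : expr.toList.foldl stepA ([], [], []) = (([] : List (List String)), arr', cur') := by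
    simpa using heq
  simp only [braceExpansionII, braceExpansionII_alt, hst]
  rw [he]
  apply PySem.List.sorted_eq_sorted_of_perm _ _ _ (fun _ _ h => h)
  rw [List.perm_ext_iff_of_nodup (PySem.Set.nodup_ofList _) hnd]
  intro x
  rw [PySem.Set.mem_ofList, hmem x]
  simp
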